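-- pv_equiv track=rewrite | github.com/jiyali/python-offer | 53_03数组中数值和下标相等的元素.py | getNumberSameAsIndex
-- ===== SOURCE A (Python) =====
-- def getNumberSameAsIndex(nums):
--     if len(nums) == 0:
--         return -1
--
--     left = 0
--     right = len(nums) - 1
--
--     while left <= right:
--         mid = left + (right - left + 1) // 2
--         if nums[mid] == mid:
--             return mid
--         if nums[mid] > mid:
--             right = mid - 1
--         else:
--             left = mid + 1
--     return -1
-- ===== SOURCE B (Python) =====
-- def getNumberSameAsIndex(nums):
--     def search(left, right):
--         if left > right:
--             return None
--         mid = (left + right + 1) // 2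
--         v = nums[mid]
--         if v < mid:
--             return search(mid + 1, right)
--         if v > mid:
--             return search(left, mid - 1)
--         return mid
--     res = search(0, len(nums) - 1)
--     return -1 if res is None else res
-- ===== Notes on version B (the rewrite author's own statement) =====
-- stated objective: simpler
-- what changed: Replaces the iterative while-loop (mutable left/right, explicit empty-list guard) with a recursive helper returning Optional[int], an equivalent simplified midpoint formula (left+right+1)//2, and reordered comparisons, so the empty case falls out of the left>right base case.
import Mathlib
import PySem

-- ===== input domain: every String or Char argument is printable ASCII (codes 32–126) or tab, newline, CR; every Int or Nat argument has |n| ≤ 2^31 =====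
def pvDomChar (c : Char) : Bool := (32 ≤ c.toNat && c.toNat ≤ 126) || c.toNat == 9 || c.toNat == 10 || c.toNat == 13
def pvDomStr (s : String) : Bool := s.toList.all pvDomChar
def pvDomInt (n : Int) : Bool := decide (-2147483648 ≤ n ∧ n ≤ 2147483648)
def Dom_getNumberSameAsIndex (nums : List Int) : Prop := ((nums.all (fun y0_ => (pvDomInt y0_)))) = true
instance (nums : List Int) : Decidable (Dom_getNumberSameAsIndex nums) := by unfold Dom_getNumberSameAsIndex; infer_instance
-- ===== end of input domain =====

-- B replaces A's while-loop (mutable bounds, explicit empty guard) by a recursive Option-valued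
-- search with the simplified midpoint (l+r+1)//2; the empty case falls out of the base case.

-- ===== PORT A =====
-- A's while-loop, with fuel (the interval shrinks every iteration, so nums.length+1 steps suffice;
-- the index is always in range, so pyGetD's default is never used).
def pvLoopA (nums : List Int) : Nat → Int → Int → Int
  | 0, _, _ => -1
  | f + 1, left, right =>
    if left ≤ right then
      let mid := left + PySem.Int.floordiv (right - left + 1) 2
      let v := PySem.List.pyGetD nums mid 0
      if v = mid then mid
      else if v > mid then pvLoopA nums f left (mid - 1)
      else pvLoopA nums f (mid + 1) right
    else -1

def getNumberSameAsIndex (nums : List Int) : Int :=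
  if nums.length = 0 then -1
  else pvLoopA nums (nums.length + 1) 0 ((nums.length : Int) - 1)

-- ===== PORT B =====
def pvSearchB (nums : List Int) : Nat → Int → Int → Option Int
  | 0, _, _ => none
  | f + 1, l, r =>
    if l > r then none
    else
      let mid := PySem.Int.floordiv (l + r + 1) 2
      let v := PySem.List.pyGetD nums mid 0
      if v < mid then pvSearchB nums f (mid + 1) r
      else if v > mid then pvSearchB nums f l (mid - 1)
      else some mid

def getNumberSameAsIndex_alt (nums : List Int) : Int :=
  (pvSearchB nums (nums.length + 1) 0 ((nums.length : Int) - 1)).getD (-1)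

-- ===== PRECONDITION & SPEC =====
def Spec_getNumberSameAsIndex (nums : List Int) (out : Int) : Prop := out = getNumberSameAsIndex_alt nums
instance (nums : List Int) (out : Int) : Decidable (Spec_getNumberSameAsIndex nums out) := by unfold Spec_getNumberSameAsIndex; infer_instance

-- ===== CLAIM (what is proved, stated in full; the proofs are below) =====
def Claim_equal_getNumberSameAsIndex : Prop := ∀ (nums : List Int), Dom_getNumberSameAsIndex nums → Spec_getNumberSameAsIndex nums (getNumberSameAsIndex nums)

-- ===== LEMMAS AND PROOFS =====

-- The two midpoint formulas agree.
theorem pvMid_eq (l r : Int) :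
    l + PySem.Int.floordiv (r - l + 1) 2 = PySem.Int.floordiv (l + r + 1) 2 := by
  rw [PySem.Int.floordiv_eq_ediv_of_pos (by norm_num), PySem.Int.floordiv_eq_ediv_of_pos (by norm_num)]
  omega

theorem pvLoop_eq_search (nums : List Int) (f : Nat) (l r : Int) :
    pvLoopA nums f l r = (pvSearchB nums f l r).getD (-1) := by
  induction f generalizing l r with
  | zero => simp [pvLoopA, pvSearchB]
  | succ f ih =>
    simp only [pvLoopA, pvSearchB]
    by_cases h : l ≤ r
    · rw [if_pos h, if_neg (by omega : ¬ l > r)]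
      rw [pvMid_eq l r]
      set mid := PySem.Int.floordiv (l + r + 1) 2 with hm
      set v := PySem.List.pyGetD nums mid 0 with hv
      rcases lt_trichotomy v mid with hc | hc | hc
      · rw [if_neg (by omega), if_neg (by omega), if_pos hc, ih]
      · rw [if_pos hc, if_neg (by omega : ¬ v < mid), if_neg (by omega : ¬ v > mid)]
        simp
      · rw [if_neg (by omega : ¬ v = mid), if_pos hc, if_neg (by omega : ¬ v < mid), if_pos hc, ih]
    · rw [if_neg h, if_pos (by omega : l > r)]
      simp

-- ===== VERDICT (by name: the statement is the Claim_ definition above) =====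
theorem getNumberSameAsIndex_spec : Claim_equal_getNumberSameAsIndex := by
  intro nums _
  unfold Spec_getNumberSameAsIndex getNumberSameAsIndex getNumberSameAsIndex_alt
  by_cases h : nums.length = 0
  · rw [if_pos h]
    cases nums with
    | nil => simp [pvSearchB]
    | cons a t => simp at h
  · rw [if_neg h, pvLoop_eq_search]
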